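-- pv_equiv track=rewrite | github.com/lindsay0416/Topic_Extraction | topic_model.py | get_documents_person
-- ===== SOURCE A (Python) =====
-- def get_documents_person(file_list):
--     person_dict = {}
--     for file in file_list:
--         person_name = file.split('.')[-2]
--         if person_dict.get(person_name, -1) == -1:
--             person_dict[person_name] = [file]
--         else:
--             person_dict[person_name].append(file)
--     return person_dict
-- ===== SOURCE B (Python) =====
-- def get_documents_person(file_list):
--     # Two-pass sort-free grouping: extract all names once, dedup them in first-occurrence
--     # order, then build each group with one comprehension per distinct name.
--     names = [f.split('.')[-2] for f in file_list]
--     seen = []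
--     for n in names:
--         if n not in seen:
--             seen.append(n)
--     return {n: [f for f, m in zip(file_list, names) if m == n] for n in seen}
-- ===== Notes on version B (the rewrite author's own statement) =====
-- stated objective: alternative
-- what changed: Replaces A's incremental dict building (lookup-then-insert-or-append per element) with a two-pass scheme: extract all names, dedup them in first-occurrence order, then build each group by a per-key comprehension over the zipped list.
import Mathlib
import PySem

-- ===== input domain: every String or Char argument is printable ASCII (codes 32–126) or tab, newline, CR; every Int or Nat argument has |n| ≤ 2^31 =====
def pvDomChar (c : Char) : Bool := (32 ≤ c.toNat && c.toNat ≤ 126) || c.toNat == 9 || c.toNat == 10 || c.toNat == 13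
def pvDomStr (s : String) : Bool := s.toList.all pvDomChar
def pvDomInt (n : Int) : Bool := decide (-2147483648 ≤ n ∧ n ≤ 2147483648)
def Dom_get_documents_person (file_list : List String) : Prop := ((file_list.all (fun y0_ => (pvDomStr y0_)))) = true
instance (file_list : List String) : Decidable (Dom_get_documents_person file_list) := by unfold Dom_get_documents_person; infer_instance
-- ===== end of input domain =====

-- B replaces A's incremental dict building with a dedup-names-then-group-per-key two-pass
-- scheme (alternative decomposition, same results; not claimed faster).

-- ===== PORT A =====
-- shared name extraction: file.split('.')[-2]  (identical expression in Source A and Source B;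
-- the .getD fallbacks only totalize it — Pre_ excludes the inputs where Python raises IndexError)
def pvName (file : String) : String :=
  (PySem.List.pyGet? ((PySem.Str.split? file ".").getD []) (-2)).getD ""

def get_documents_person (file_list : List String) : List (String × List String) :=
  (file_list.foldl (fun person_dict file =>
      let person_name := pvName file
      -- person_dict.get(person_name, -1) == -1 holds exactly when the key is absent
      -- (the values are lists, never equal to -1), so the branch is a presence test:
      match person_dict.get? person_name with
      | none    => person_dict.insert person_name [file]
      | some xs => person_dict.insert person_name (xs ++ [file])   -- in-place .append keeps position
    ) (PySem.Dict.empty : PySem.Dict String (List String))).items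

-- ===== PORT B =====
def get_documents_person_alt (file_list : List String) : List (String × List String) :=
  let names := file_list.map pvName
  let seen := names.foldl (fun acc n => if acc.contains n then acc else acc ++ [n]) []
  seen.map (fun n => (n, ((file_list.zip names).filter (fun p => p.2 == n)).map (·.1)))

-- ===== PRECONDITION & SPEC =====
-- Pre_ excludes exactly the inputs where Python A raises IndexError: a file name with no '.'
-- splits into a single piece and '[-2]' is out of range.
def Pre_get_documents_person (file_list : List String) : Prop :=
  ∀ f ∈ file_list, '.' ∈ f.toList
instance (file_list : List String) : Decidable (Pre_get_documents_person file_list) := by unfold Pre_get_documents_person; infer_instance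

def pvWitness_get_documents_person : List String := ["x.alice.txt", "y.bob.txt", "z.alice.txt"]

def Spec_get_documents_person (file_list : List String) (out : List (String × List String)) : Prop := out = get_documents_person_alt file_list
instance (file_list : List String) (out : List (String × List String)) : Decidable (Spec_get_documents_person file_list out) := by unfold Spec_get_documents_person; infer_instance

-- ===== CLAIM (what is proved, stated in full; the proofs are below) =====
def Claim_equal_get_documents_person : Prop := ∀ (file_list : List String), Dom_get_documents_person file_list → Pre_get_documents_person file_list → Spec_get_documents_person file_list (get_documents_person file_list)

-- ===== LEMMAS AND PROOFS =====

-- the group of a name n: files of l whose extracted name is n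
def pvGrp (l : List String) (n : String) : List String := l.filter (fun f => pvName f == n)

-- the canonical grouping both ports compute
def pvG (l : List String) : List (String × List String) :=
  (PySem.List.dedup (l.map pvName)).map (fun n => (n, pvGrp l n))

theorem pvZipFilter (l : List String) (n : String) :
    ((l.zip (l.map pvName)).filter (fun p => p.2 == n)).map (·.1) = pvGrp l n := by
  induction l with
  | nil => rfl
  | cons a t ih =>
    simp only [List.map_cons, List.zip_cons_cons, List.filter_cons, pvGrp] at *
    by_cases h : pvName a = n <;> simp [h, ih]

theorem pvAlt_eq_G (l : List String) : get_documents_person_alt l = pvG l := by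
  have hseen : (l.map pvName).foldl (fun acc n => if acc.contains n then acc else acc ++ [n]) []
      = PySem.List.dedup (l.map pvName) := rfl
  simp only [get_documents_person_alt, hseen, pvG]
  exact List.map_congr_left (fun n _ => by rw [pvZipFilter])

theorem pvDedup_append (ns : List String) (n : String) :
    PySem.List.dedup (ns ++ [n]) =
      if n ∈ ns then PySem.List.dedup ns else PySem.List.dedup ns ++ [n] := by
  have h1 : PySem.List.dedup (ns ++ [n]) = PySem.Set.add (PySem.List.dedup ns) n := by
    simp only [PySem.List.dedup, PySem.Set.ofList, List.foldl_append, List.foldl]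
  rw [h1, PySem.Set.add]
  by_cases h : n ∈ ns
  · rw [if_pos, if_pos h]
    exact List.contains_iff_mem.mpr ((PySem.List.mem_dedup ns n).mpr h)
  · rw [if_neg, if_neg h]
    intro hc
    exact h ((PySem.List.mem_dedup ns n).mp (List.contains_iff_mem.mp hc))

theorem pvGrp_append (l : List String) (f n : String) :
    pvGrp (l ++ [f]) n = pvGrp l n ++ if pvName f = n then [f] else [] := by
  simp only [pvGrp, List.filter_append]
  congr 1
  by_cases h : pvName f = n <;> simp [h]

theorem pvKeys_G (l : List String) :
    (PySem.Dict.mk (pvG l)).keys = PySem.List.dedup (l.map pvName) := by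
  show (pvG l).map (·.1) = _
  simp [pvG, List.map_map, Function.comp_def]

theorem pvA_fold (l : List String) :
    l.foldl (fun person_dict file =>
      let person_name := pvName file
      match person_dict.get? person_name with
      | none    => person_dict.insert person_name [file]
      | some xs => person_dict.insert person_name (xs ++ [file]))
      (PySem.Dict.empty : PySem.Dict String (List String))
    = PySem.Dict.mk (pvG l) := by
  induction l using List.reverseRecOn with
  | nil => rfl
  | append_singleton l f ih =>
    rw [List.foldl_append, ih, List.foldl]
    simp only [List.foldl_nil]
    have hkeys := pvKeys_G l
    have hnd : (PySem.Dict.mk (pvG l)).keys.Nodup := by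
      rw [hkeys]; exact PySem.List.nodup_dedup _
    by_cases hmem : pvName f ∈ l.map pvName
    · -- existing key: overwrite in place with the extended group
      have hget : (PySem.Dict.mk (pvG l)).get? (pvName f) = some (pvGrp l (pvName f)) := by
        apply PySem.Dict.get?_of_mem_items _ _ hnd
        show (pvName f, pvGrp l (pvName f)) ∈ pvG l
        exact List.mem_map_of_mem ((PySem.List.mem_dedup _ _).mpr hmem)
      have hcont : (PySem.Dict.mk (pvG l)).contains (pvName f) = true := by
        rw [PySem.Dict.contains_iff_mem_keys, hkeys]
        exact (PySem.List.mem_dedup _ _).mpr hmem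
      rw [hget]
      apply PySem.Dict.ext
      rw [PySem.Dict.items_insert_of_contains _ _ hcont]
      show (pvG l).map _ = pvG (l ++ [f])
      have hmaps : List.map pvName (l ++ [f]) = List.map pvName l ++ [pvName f] := by simp
      rw [pvG, pvG, hmaps, pvDedup_append, if_pos hmem, List.map_map]
      apply List.map_congr_left
      intro n hn
      by_cases h : n = pvName f
      · subst h; simp [pvGrp_append]
      · simp [pvGrp_append, h, Ne.symm h]
    · -- fresh key: appended at the end with a singleton group
      have hget : (PySem.Dict.mk (pvG l)).get? (pvName f) = none := by
        rw [PySem.Dict.get?_eq_none_iff_not_mem_keys, hkeys]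
        intro h; exact hmem ((PySem.List.mem_dedup _ _).mp h)
      have hcont : (PySem.Dict.mk (pvG l)).contains (pvName f) = false := by
        rw [← Bool.not_eq_true, PySem.Dict.contains_iff_mem_keys, hkeys]
        intro h; exact hmem ((PySem.List.mem_dedup _ _).mp h)
      rw [hget]
      apply PySem.Dict.ext
      rw [PySem.Dict.items_insert_of_not_contains _ _ hcont]
      show pvG l ++ [(pvName f, [f])] = pvG (l ++ [f])
      have hmaps : List.map pvName (l ++ [f]) = List.map pvName l ++ [pvName f] := by simp
      rw [pvG, pvG, hmaps, pvDedup_append, if_neg hmem, List.map_append]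
      congr 1
      · apply List.map_congr_left
        intro n hn
        have hne : pvName f ≠ n := by
          intro h; exact hmem (h ▸ (PySem.List.mem_dedup _ _).mp hn)
        rw [pvGrp_append, if_neg hne, List.append_nil]
      · have hempty : pvGrp l (pvName f) = [] := by
          rw [pvGrp, List.filter_eq_nil_iff]
          intro a ha h
          have hmm := List.mem_map_of_mem (f := pvName) ha
          rw [beq_iff_eq.mp h] at hmm
          exact hmem hmm
        simp only [List.map_cons, List.map_nil]
        rw [pvGrp_append, hempty, if_pos rfl, List.nil_append]

-- ===== VERDICT (by name: the statement is the Claim_ definition above) =====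
theorem get_documents_person_spec : Claim_equal_get_documents_person := by
  intro file_list _ _
  show get_documents_person file_list = get_documents_person_alt file_list
  rw [get_documents_person, pvA_fold, pvAlt_eq_G]
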